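-- pv_equiv track=rewrite | github.com/mrBrain101/Yandex_Algorithm_Training_6_2024_GIT | 02_Prefix_sum_and_Two_pointers/07_Find_clean_string/submit.py | find_clean_string
-- ===== SOURCE A (Python) =====
-- def find_clean_string(s: str, c: int, k: int) -> int:
--     l = r = 0
--     a = b = 0
--     x = 0
--     max_len = 0
--
--     while r < c:
--         if s[r] == 'a':
--             a += 1
--         elif s[r] == 'b':
--             x += a
--             b += 1
--
--         if x > k:
--             if s[l] == 'a':
--                 l += 1
--                 x -= b
--                 a -= 1
--             elif s[l] == 'b':
--                 l += 1
--                 b -= 1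
--             else:
--                 l += 1
--
--         max_len = max(max_len, r - l + 1)
--         r += 1
--
--     return max_len
-- ===== SOURCE B (Python) =====
-- def find_clean_string(s: str, c: int, k: int) -> int:
--     # Explicit-window variant: keep the current window as a queue of characters,
--     # pop from the front when the inversion count exceeds k; since the window
--     # never shrinks by more than it grows, the answer is the final window length.
--     win = []
--     a = b = x = 0
--     for ch in s[:max(c, 0)]:
--         win.append(ch)
--         if ch == 'a':
--             a += 1
--         elif ch == 'b':
--             b += 1
--             x += a
--         if x > k:
--             first = win.pop(0)
--             if first == 'a':
--                 a -= 1
--                 x -= b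
--             elif first == 'b':
--                 b -= 1
--     return len(win)
-- ===== Notes on version B (the rewrite author's own statement) =====
-- stated objective: alternative
-- what changed: B replaces A's index arithmetic (l/r pointers into s plus a running max) by an explicit character queue: it folds over the chars of s[:c], appends to the window, pops the front when the inversion count exceeds k, and returns the final window length (the window size never decreases, so no max accumulator is needed).
import Mathlib
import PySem

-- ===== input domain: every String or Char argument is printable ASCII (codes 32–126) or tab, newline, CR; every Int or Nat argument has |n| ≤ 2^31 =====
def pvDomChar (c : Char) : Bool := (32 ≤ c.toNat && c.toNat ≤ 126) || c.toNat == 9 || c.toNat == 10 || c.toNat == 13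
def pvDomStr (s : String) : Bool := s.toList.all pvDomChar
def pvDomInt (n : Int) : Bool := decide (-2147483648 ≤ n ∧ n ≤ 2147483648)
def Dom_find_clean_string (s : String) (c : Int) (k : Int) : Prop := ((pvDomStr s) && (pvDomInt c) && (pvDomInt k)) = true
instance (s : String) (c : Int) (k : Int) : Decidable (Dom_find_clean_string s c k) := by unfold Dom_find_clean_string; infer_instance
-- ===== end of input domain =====

-- B keeps the window as an explicit character queue and returns its final length
-- (no l/r index arithmetic, no running max); same return value as A on Pre_ (alternative decomposition).

-- ===== PORT A =====
-- literal transliteration of A's while-loop; s[r]/s[l] via PySem.Str.pyGet?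
-- (the .getD ' ' default is only reached where Python raises IndexError, outside Pre_)
def find_clean_string.loopA (s : String) (c k r l a b x maxlen : Int) : Int :=
  if _h : r < c then
    let ch := (PySem.Str.pyGet? s r).getD ' '
    let st1 : Int × Int × Int :=
      if ch = 'a' then (a + 1, b, x)
      else if ch = 'b' then (a, b + 1, x + a)
      else (a, b, x)
    let a1 := st1.1; let b1 := st1.2.1; let x1 := st1.2.2
    let st2 : Int × Int × Int × Int :=
      if x1 > k then
        let chl := (PySem.Str.pyGet? s l).getD ' '
        if chl = 'a' then (l + 1, a1 - 1, b1, x1 - b1)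
        else if chl = 'b' then (l + 1, a1, b1 - 1, x1)
        else (l + 1, a1, b1, x1)
      else (l, a1, b1, x1)
    find_clean_string.loopA s c k (r + 1) st2.1 st2.2.1 st2.2.2.1 st2.2.2.2
      (max maxlen (r - st2.1 + 1))
  else maxlen
termination_by (c - r).toNat
decreasing_by omega

def find_clean_string (s : String) (c : Int) (k : Int) : Int :=
  find_clean_string.loopA s c k 0 0 0 0 0 0

-- ===== PORT B =====
-- one fold step of Source B's for-loop: append ch to the window, update the counts,
-- pop the front char if the inversion count exceeds k (the window is never empty there,
-- so Python's win.pop(0) cannot raise; the [] match arm is unreachable)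
def find_clean_string_alt.step (k : Int) (st : List Char × Int × Int × Int) (ch : Char) :
    List Char × Int × Int × Int :=
  let win0 := st.1; let a0 := st.2.1; let b0 := st.2.2.1; let x0 := st.2.2.2
  let win := win0 ++ [ch]
  let st1 : Int × Int × Int :=
    if ch = 'a' then (a0 + 1, b0, x0)
    else if ch = 'b' then (a0, b0 + 1, x0 + a0)
    else (a0, b0, x0)
  let a := st1.1; let b := st1.2.1; let x := st1.2.2
  if x > k then
    match win with
    | [] => ([], a, b, x)
    | first :: rest =>
      if first = 'a' then (rest, a - 1, b, x - b)
      else if first = 'b' then (rest, a, b - 1, x)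
      else (rest, a, b, x)
  else (win, a, b, x)

def find_clean_string_alt (s : String) (c : Int) (k : Int) : Int :=
  let chars := PySem.Str.slice s none (some (max c 0))   -- s[:max(c, 0)]
  let fin := (chars.toList).foldl (find_clean_string_alt.step k) ([], 0, 0, 0)
  (fin.1.length : Int)

-- ===== PRECONDITION & SPEC =====
-- Pre_ excludes exactly c > len(s), where A raises IndexError at s[r].
def Pre_find_clean_string (s : String) (c : Int) (k : Int) : Prop := c ≤ PySem.Str.len s
instance (s : String) (c : Int) (k : Int) : Decidable (Pre_find_clean_string s c k) := by
  unfold Pre_find_clean_string; infer_instance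

def pvWitness_find_clean_string : String × Int × Int := ("abcab", 5, 1)

def Spec_find_clean_string (s : String) (c : Int) (k : Int) (out : Int) : Prop := out = find_clean_string_alt s c k
instance (s : String) (c : Int) (k : Int) (out : Int) : Decidable (Spec_find_clean_string s c k out) := by unfold Spec_find_clean_string; infer_instance

-- ===== CLAIM (what is proved, stated in full; the proofs are below) =====
def Claim_equal_find_clean_string : Prop := ∀ (s : String) (c : Int) (k : Int), Dom_find_clean_string s c k → Pre_find_clean_string s c k → Spec_find_clean_string s c k (find_clean_string s c k)

-- ===== LEMMAS AND PROOFS =====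

lemma window_append (t : List Char) (l m : Nat) (h : l + m < t.length) :
    (t.drop l).take m ++ [t[l + m]] = (t.drop l).take (m + 1) := by
  rw [List.take_add_one]
  congr 1
  rw [List.getElem?_drop]
  simp [List.getElem?_eq_getElem h]

lemma loopA_eq_foldl (s : String) (c k : Int) (hc : c ≤ (s.toList.length : Int)) :
    ∀ (n : Nat) (r l a b x : Int), (c - r).toNat = n → 0 ≤ l → l ≤ r → r ≤ c →
    find_clean_string.loopA s c k r l a b x (r - l) =
      ((((s.toList.take c.toNat).drop r.toNat).foldl (find_clean_string_alt.step k)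
        ((s.toList.drop l.toNat).take (r - l).toNat, a, b, x)).1.length : Int) := by
  intro n
  induction n with
  | zero =>
    intro r l a b x hn hl hlr hrc
    rw [find_clean_string.loopA, dif_neg (by omega)]
    rw [show (s.toList.take c.toNat).drop r.toNat = ([] : List Char) from
      List.drop_eq_nil_of_le (by rw [List.length_take]; omega)]
    simp only [List.foldl_nil]
    rw [List.length_take, List.length_drop]
    omega
  | succ n ih =>
    intro r l a b x hn hl hlr hrc
    have hrlt : r < c := by omega
    have hrlen : r.toNat < s.toList.length := by omega
    have hllen : l.toNat < s.toList.length := by omega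
    have hch : (PySem.Str.pyGet? s r).getD ' ' = s.toList[r.toNat] := by
      rw [PySem.Str.pyGet?_eq, PySem.Chars.pyGet?_eq_listPyGet?,
        PySem.List.pyGet?_eq_some_getElem s.toList (by omega) (by omega)]
      rfl
    have hchl : (PySem.Str.pyGet? s l).getD ' ' = s.toList[l.toNat] := by
      rw [PySem.Str.pyGet?_eq, PySem.Chars.pyGet?_eq_listPyGet?,
        PySem.List.pyGet?_eq_some_getElem s.toList (by omega) (by omega)]
      rfl
    have hlist : (s.toList.take c.toNat).drop r.toNat
        = s.toList[r.toNat] :: (s.toList.take c.toNat).drop (r.toNat + 1) := by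
      rw [List.drop_eq_getElem_cons (by rw [List.length_take]; omega)]
      congr 1
      exact List.getElem_take
    rw [find_clean_string.loopA, dif_pos hrlt, hlist, List.foldl_cons]
    simp only [hch, hchl, find_clean_string_alt.step]
    generalize (if s.toList[r.toNat] = 'a' then (a + 1, b, x)
      else if s.toList[r.toNat] = 'b' then (a, b + 1, x + a) else (a, b, x) : Int × Int × Int) = s1
    obtain ⟨a1, b1, x1⟩ := s1
    dsimp only
    have hr1 : r.toNat + 1 = (r + 1).toNat := by omega
    by_cases hx : x1 > k
    · -- shrink branch
      rw [if_pos hx, if_pos hx]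
      by_cases heq : l = r
      · -- empty window: the popped char is ch itself
        subst heq
        rw [show (l - l).toNat = 0 from by omega, List.take_zero, List.nil_append]
        dsimp only
        by_cases h1 : s.toList[l.toNat] = 'a'
        · rw [if_pos h1, if_pos h1]
          dsimp only
          rw [show max (l - l) (l - (l + 1) + 1) = l + 1 - (l + 1) from by omega, hr1]
          have H := ih (l + 1) (l + 1) (a1 - 1) b1 (x1 - b1) (by omega) (by omega) (by omega) (by omega)
          rw [show (l + 1 - (l + 1)).toNat = 0 from by omega, List.take_zero] at H
          exact H
        · rw [if_neg h1, if_neg h1]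
          by_cases h2 : s.toList[l.toNat] = 'b'
          · rw [if_pos h2, if_pos h2]
            dsimp only
            rw [show max (l - l) (l - (l + 1) + 1) = l + 1 - (l + 1) from by omega, hr1]
            have H := ih (l + 1) (l + 1) a1 (b1 - 1) x1 (by omega) (by omega) (by omega) (by omega)
            rw [show (l + 1 - (l + 1)).toNat = 0 from by omega, List.take_zero] at H
            exact H
          · rw [if_neg h2, if_neg h2]
            dsimp only
            rw [show max (l - l) (l - (l + 1) + 1) = l + 1 - (l + 1) from by omega, hr1]
            have H := ih (l + 1) (l + 1) a1 b1 x1 (by omega) (by omega) (by omega) (by omega)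
            rw [show (l + 1 - (l + 1)).toNat = 0 from by omega, List.take_zero] at H
            exact H
      · -- nonempty window: the popped char is s[l]
        have hwnd : List.take (r - l).toNat (List.drop l.toNat s.toList)
            = s.toList[l.toNat] :: List.take ((r - l).toNat - 1) (List.drop (l.toNat + 1) s.toList) := by
          conv_lhs => rw [List.drop_eq_getElem_cons hllen,
            show (r - l).toNat = ((r - l).toNat - 1) + 1 from by omega, List.take_succ_cons]
        have happ : List.take ((r - l).toNat - 1) (List.drop (l.toNat + 1) s.toList) ++ [s.toList[r.toNat]]
            = List.take (r + 1 - (l + 1)).toNat (List.drop (l + 1).toNat s.toList) := by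
          have hw := window_append s.toList (l.toNat + 1) ((r - l).toNat - 1) (by omega)
          simp only [show l.toNat + 1 + ((r - l).toNat - 1) = r.toNat from by omega] at hw
          rw [show (l + 1).toNat = l.toNat + 1 from by omega, hw]
          congr 1
          omega
        rw [hwnd, List.cons_append]
        dsimp only
        rw [happ]
        by_cases h1 : s.toList[l.toNat] = 'a'
        · rw [if_pos h1, if_pos h1]
          dsimp only
          rw [show max (r - l) (r - (l + 1) + 1) = r + 1 - (l + 1) from by omega, hr1]
          exact ih (r + 1) (l + 1) (a1 - 1) b1 (x1 - b1) (by omega) (by omega) (by omega) (by omega)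
        · rw [if_neg h1, if_neg h1]
          by_cases h2 : s.toList[l.toNat] = 'b'
          · rw [if_pos h2, if_pos h2]
            dsimp only
            rw [show max (r - l) (r - (l + 1) + 1) = r + 1 - (l + 1) from by omega, hr1]
            exact ih (r + 1) (l + 1) a1 (b1 - 1) x1 (by omega) (by omega) (by omega) (by omega)
          · rw [if_neg h2, if_neg h2]
            dsimp only
            rw [show max (r - l) (r - (l + 1) + 1) = r + 1 - (l + 1) from by omega, hr1]
            exact ih (r + 1) (l + 1) a1 b1 x1 (by omega) (by omega) (by omega) (by omega)
    · -- no shrink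
      rw [if_neg hx, if_neg hx]
      dsimp only
      rw [show max (r - l) (r - l + 1) = r + 1 - l from by omega]
      have hwinA : List.take (r - l).toNat (List.drop l.toNat s.toList) ++ [s.toList[r.toNat]]
          = List.take (r + 1 - l).toNat (List.drop l.toNat s.toList) := by
        have hw := window_append s.toList l.toNat (r - l).toNat (by omega)
        simp only [show l.toNat + (r - l).toNat = r.toNat from by omega] at hw
        rw [hw]
        congr 1
        omega
      rw [hwinA, hr1]
      exact ih (r + 1) l a1 b1 x1 (by omega) hl (by omega) (by omega)


-- ===== VERDICT (by name: the statement is the Claim_ definition above) =====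
theorem find_clean_string_spec : Claim_equal_find_clean_string := by
  intro s c k _hdom hpre
  unfold Spec_find_clean_string find_clean_string find_clean_string_alt
  unfold Pre_find_clean_string at hpre
  rw [PySem.Str.len_eq] at hpre
  dsimp only
  rw [PySem.Str.toList_slice, PySem.Chars.slice_eq_listSlice,
    PySem.List.slice_to s.toList (le_max_right c 0)]
  by_cases hc : 0 ≤ c
  · have H := loopA_eq_foldl s c k hpre (c - 0).toNat 0 0 0 0 0 rfl le_rfl le_rfl hc
    simp only [List.take_zero, List.drop_zero,
      Int.toNat_zero, sub_zero] at H
    rw [show (max c 0).toNat = c.toNat from by omega]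
    exact H
  · rw [find_clean_string.loopA, dif_neg (by omega)]
    rw [show (max c 0).toNat = 0 from by omega]
    simp
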